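-- pv_equiv track=rewrite | github.com/RINz-HCMUS/AI---Project-2-Gem-hunter | PysatSupport.py | generate_around
-- ===== SOURCE A (Python) =====
-- def generate_around(pos, size):
--     r, c = pos
--     num_r, num_c = size
--     for i in range(-1, 2):
--         for j in range(-1, 2):
--             new_r, new_c = r + i, c + j
--             if 0 <= new_r < num_r and 0 <= new_c < num_c:
--                 yield new_r, new_c
-- ===== SOURCE B (Python) =====
-- def generate_around(pos, size):
--     r, c = pos
--     num_r, num_c = size
--     x0 = max(0, r - 1)
--     y0 = max(0, c - 1)
--     h = min(num_r, r + 2) - x0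
--     w = min(num_c, c + 2) - y0
--     if h > 0 and w > 0:
--         for k in range(h * w):
--             q, m = divmod(k, w)
--             yield (x0 + q, y0 + m)
-- ===== Notes on version B (the rewrite author's own statement) =====
-- stated objective: alternative
-- what changed: B computes the clipped rectangle's origin and dimensions once and runs a single flat loop over h*w cell indices, decoding each index into (row, col) with divmod, instead of A's nested offset loops with a per-cell bounds check.
import Mathlib
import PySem

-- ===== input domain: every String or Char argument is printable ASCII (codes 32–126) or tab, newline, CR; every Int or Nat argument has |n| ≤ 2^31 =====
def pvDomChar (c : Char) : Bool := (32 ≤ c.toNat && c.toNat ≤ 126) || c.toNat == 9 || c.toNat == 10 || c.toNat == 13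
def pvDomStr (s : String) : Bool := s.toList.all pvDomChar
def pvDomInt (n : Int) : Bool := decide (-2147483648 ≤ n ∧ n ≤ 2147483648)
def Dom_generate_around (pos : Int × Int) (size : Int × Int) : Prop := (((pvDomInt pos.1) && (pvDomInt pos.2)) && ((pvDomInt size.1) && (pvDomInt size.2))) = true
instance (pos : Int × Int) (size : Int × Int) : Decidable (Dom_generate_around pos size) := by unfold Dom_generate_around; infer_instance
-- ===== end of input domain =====

-- B computes the clipped rectangle's origin and h*w size once and decodes flat cell
-- indices with divmod in one loop, instead of A's nested offset loops with a per-cell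
-- bounds check (objective: alternative).


-- ===== PORT A =====
-- r, c = pos; num_r, num_c = size; the generator's yields are collected into a list
def generate_around (pos : Int × Int) (size : Int × Int) : List (Int × Int) :=
  (PySem.List.pyRange (-1) 2 1).foldl (fun acc i =>
    (PySem.List.pyRange (-1) 2 1).foldl (fun acc j =>
      if 0 ≤ pos.1 + i ∧ pos.1 + i < size.1 ∧ 0 ≤ pos.2 + j ∧ pos.2 + j < size.2 then
        acc ++ [(pos.1 + i, pos.2 + j)]
      else acc) acc) []

-- ===== PORT B =====
-- x0, y0 = clipped rectangle origin; h, w = its dimensions; one flat loop over h*w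
-- indices, each decoded by divmod(k, w) (= floordiv/mod, exact Python semantics)
def generate_around_alt (pos : Int × Int) (size : Int × Int) : List (Int × Int) :=
  let x0 := max 0 (pos.1 - 1)
  let y0 := max 0 (pos.2 - 1)
  let h := min size.1 (pos.1 + 2) - x0
  let w := min size.2 (pos.2 + 2) - y0
  if 0 < h ∧ 0 < w then
    (PySem.List.pyRange 0 (h * w) 1).foldl (fun acc k =>
      acc ++ [(x0 + PySem.Int.floordiv k w, y0 + PySem.Int.mod k w)]) []
  else []

-- ===== PRECONDITION & SPEC =====
def Spec_generate_around (pos : Int × Int) (size : Int × Int) (out : List (Int × Int)) : Prop := out = generate_around_alt pos size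
instance (pos : Int × Int) (size : Int × Int) (out : List (Int × Int)) : Decidable (Spec_generate_around pos size out) := by unfold Spec_generate_around; infer_instance

-- ===== CLAIM (what is proved, stated in full; the proofs are below) =====
def Claim_equal_generate_around : Prop := ∀ (pos : Int × Int) (size : Int × Int), Dom_generate_around pos size → Spec_generate_around pos size (generate_around pos size)

-- ===== LEMMAS AND PROOFS =====

theorem pyR_m1_2 : PySem.List.pyRange (-1) 2 1 = [-1, 0, 1] := by decide

-- foldl congruence over a list when the step functions agree on its members
theorem foldlCongrMem {α β : Type} {l : List α} {f g : β → α → β} (init : β)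
    (h : ∀ acc x, x ∈ l → f acc x = g acc x) : l.foldl f init = l.foldl g init := by
  induction l generalizing init with
  | nil => rfl
  | cons a t ih =>
    simp only [List.foldl]
    rw [h init a (by simp)]
    exact ih _ (fun acc x hx => h acc x (by simp [hx]))

-- a conditional extend-loop is append of the flatMap over the filtered list
theorem foldl_ite_flatMap {α : Type} (p : Int → Prop) [DecidablePred p] (g : Int → List α)
    (l : List Int) (acc : List α) :
    l.foldl (fun acc x => if p x then acc ++ g x else acc) acc
      = acc ++ (l.filter (fun x => decide (p x))).flatMap g := by
  induction l generalizing acc with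
  | nil => simp
  | cons h t ih =>
    simp only [List.foldl, List.filter]
    by_cases hp : p h <;> simp [hp, ih, List.append_assoc]

-- the clamped range is exactly the in-bounds members of [x-1, x, x+1]
theorem range3 (x n : Int) :
    PySem.List.pyRange (max 0 (x - 1)) (min n (x + 2)) 1
      = [x - 1, x, x + 1].filter (fun v => decide (0 ≤ v ∧ v < n)) := by
  have nd1 := PySem.List.nodup_pyRange_one (a := max 0 (x - 1)) (b := min n (x + 2))
  have p1 := PySem.List.pairwise_lt_pyRange_one (a := max 0 (x - 1)) (b := min n (x + 2))
  have nd2 : ([x - 1, x, x + 1].filter (fun v => decide (0 ≤ v ∧ v < n))).Nodup := by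
    apply List.Nodup.filter
    simp
    try omega
  have p2 : ([x - 1, x, x + 1].filter (fun v => decide (0 ≤ v ∧ v < n))).Pairwise (· < ·) := by
    apply List.Pairwise.filter
    simp
    try omega
  refine List.Perm.eq_of_pairwise (le := (· < ·)) ?_ p1 p2 ?_
  · exact fun a b _ _ hab hba => absurd hba (lt_asymm hab)
  rw [List.perm_ext_iff_of_nodup nd1 nd2]
  intro v
  simp [PySem.List.mem_pyRange_one, List.mem_filter]
  omega

-- one dimension of A's enumerate-and-filter equals the clamped range
theorem dim1 {α : Type} (x n : Int) (f : Int → List α) (acc : List α) :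
    ([-1, 0, 1] : List Int).foldl
        (fun acc i => if 0 ≤ x + i ∧ x + i < n then acc ++ f (x + i) else acc) acc
      = acc ++ (PySem.List.pyRange (max 0 (x - 1)) (min n (x + 2)) 1).flatMap f := by
  rw [range3]
  refine (foldl_ite_flatMap (fun i => 0 ≤ x + i ∧ x + i < n) (fun i => f (x + i)) _ acc).trans ?_
  have hmap : ([-1, 0, 1] : List Int).map (fun i => x + i) = [x - 1, x, x + 1] := by
    simp
    omega
  rw [← hmap, List.filter_map, List.flatMap_map]
  rfl

-- A equals the row-major flatMap over the clipped rectangle's rows and columns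
theorem A_clipped (r c num_r num_c : Int) :
    generate_around (r, c) (num_r, num_c)
      = (PySem.List.pyRange (max 0 (r - 1)) (min num_r (r + 2)) 1).flatMap
          (fun nr => (PySem.List.pyRange (max 0 (c - 1)) (min num_c (c + 2)) 1).flatMap
            (fun nc => [(nr, nc)])) := by
  simp only [generate_around]
  rw [pyR_m1_2]
  have inner : ∀ (i : Int) (acc : List (Int × Int)),
      ([-1, 0, 1] : List Int).foldl (fun acc j =>
        if 0 ≤ r + i ∧ r + i < num_r ∧ 0 ≤ c + j ∧ c + j < num_c then
          acc ++ [(r + i, c + j)] else acc) acc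
      = (if 0 ≤ r + i ∧ r + i < num_r then
          acc ++ (PySem.List.pyRange (max 0 (c - 1)) (min num_c (c + 2)) 1).flatMap
            (fun nc => [(r + i, nc)]) else acc) := by
    intro i acc
    by_cases hP : 0 ≤ r + i ∧ r + i < num_r
    · rw [if_pos hP]
      have hd := dim1 (α := Int × Int) c num_c (fun nc => [(r + i, nc)]) acc
      simp only [hP.1, hP.2, true_and] at *
      exact hd
    · rw [if_neg hP]
      simp only [List.foldl]
      rw [if_neg (by tauto), if_neg (by tauto), if_neg (by tauto)]
  rw [foldlCongrMem (l := ([-1, 0, 1] : List Int)) [] (fun acc i _ => inner i acc)]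
  have hd := dim1 (α := Int × Int) r num_r
    (fun nr => List.flatMap (fun nc => [((nr : Int), (nc : Int))])
      (PySem.List.pyRange (max 0 (c - 1)) (min num_c (c + 2)) 1)) []
  rw [hd]
  simp

-- a flatMap of singletons is a map
theorem flatMapSingle {α β : Type} {f : α → β} (l : List α) :
    l.flatMap (fun x => [f x]) = l.map f := by
  induction l with
  | nil => rfl
  | cons a t ih => simp [ih]

-- decoding h*w flat indices with divmod yields the row-major rectangle enumeration
theorem decode (x0 y0 w : Int) (hw : 0 < w) (h : Nat) :
    (PySem.List.pyRange 0 ((h : Int) * w) 1).flatMap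
        (fun k => [(x0 + PySem.Int.floordiv k w, y0 + PySem.Int.mod k w)])
      = (PySem.List.pyRange x0 (x0 + h) 1).flatMap
          (fun x => (PySem.List.pyRange y0 (y0 + w) 1).flatMap (fun y => [(x, y)])) := by
  induction h with
  | zero => simp [PySem.List.pyRange_one_eq_nil]
  | succ n ih =>
    have hsplitL : PySem.List.pyRange 0 (((n + 1 : Nat) : Int) * w) 1
        = PySem.List.pyRange 0 ((n : Int) * w) 1
          ++ PySem.List.pyRange ((n : Int) * w) ((n : Int) * w + w) 1 := by
      have : ((n + 1 : Nat) : Int) * w = (n : Int) * w + w := by push_cast; ring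
      rw [this]
      exact PySem.List.pyRange_one_append 0 ((n : Int) * w) ((n : Int) * w + w)
        (by positivity) (by omega)
    have hsplitR : PySem.List.pyRange x0 (x0 + ((n + 1 : Nat) : Int)) 1
        = PySem.List.pyRange x0 (x0 + (n : Int)) 1 ++ [x0 + (n : Int)] := by
      have : x0 + ((n + 1 : Nat) : Int) = (x0 + (n : Int)) + 1 := by push_cast; ring
      rw [this]
      exact PySem.List.pyRange_one_succ_right (by omega)
    rw [hsplitL, hsplitR, List.flatMap_append, List.flatMap_append, ih]
    congr 1
    simp only [List.flatMap_cons, List.flatMap_nil, List.append_nil]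
    -- the last block of w indices decodes to row x0+n
    rw [flatMapSingle, flatMapSingle]
    apply List.ext_getElem
    · simp [PySem.List.length_pyRange_one]
      try omega
    intro k hk1 hk2
    simp only [List.length_map, PySem.List.length_pyRange_one] at hk1
    have hkw : (k : Int) < w := by omega
    simp only [List.getElem_map, PySem.List.getElem_pyRange_one]
    have hdiv : PySem.Int.floordiv ((n : Int) * w + (k : Int)) w = (n : Int) := by
      unfold PySem.Int.floordiv
      rw [Int.fdiv_eq_ediv, if_pos (Or.inl hw.le)]
      rw [add_comm, Int.add_mul_ediv_right _ _ (ne_of_gt hw)]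
      rw [Int.ediv_eq_zero_of_lt (by positivity) hkw]
      ring
    have hmod : PySem.Int.mod ((n : Int) * w + (k : Int)) w = (k : Int) := by
      unfold PySem.Int.mod
      rw [Int.fmod_eq_emod, if_pos (Or.inl hw.le), add_comm ((n : Int) * w) (k : Int),
        mul_comm (n : Int) w, Int.add_mul_emod_self_left,
        Int.emod_eq_of_lt (by positivity) hkw]
      ring
    rw [hdiv, hmod]

theorem generate_around_eq (pos size : Int × Int) :
    generate_around pos size = generate_around_alt pos size := by
  obtain ⟨r, c⟩ := pos
  obtain ⟨num_r, num_c⟩ := size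
  rw [A_clipped]
  simp only [generate_around_alt]
  by_cases hpos : 0 < min num_r (r + 2) - max 0 (r - 1) ∧ 0 < min num_c (c + 2) - max 0 (c - 1)
  · rw [if_pos hpos]
    obtain ⟨hh, hw⟩ := hpos
    rw [PySem.List.foldl_append_eq_flatMap, List.nil_append]
    have hdec := decode (max 0 (r - 1)) (max 0 (c - 1)) (min num_c (c + 2) - max 0 (c - 1)) hw
      (min num_r (r + 2) - max 0 (r - 1)).toNat
    have hcast : ((min num_r (r + 2) - max 0 (r - 1)).toNat : Int)
        = min num_r (r + 2) - max 0 (r - 1) := Int.toNat_of_nonneg hh.le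
    rw [hcast] at hdec
    have hx1 : max 0 (r - 1) + (min num_r (r + 2) - max 0 (r - 1)) = min num_r (r + 2) := by ring
    have hy1 : max 0 (c - 1) + (min num_c (c + 2) - max 0 (c - 1)) = min num_c (c + 2) := by ring
    rw [hx1, hy1] at hdec
    exact hdec.symm
  · rw [if_neg hpos]
    rcases not_and_or.mp hpos with hh | hw
    · rw [PySem.List.pyRange_one_eq_nil (a := max 0 (r - 1)) (b := min num_r (r + 2)) (by omega)]
      simp
    · rw [PySem.List.pyRange_one_eq_nil (a := max 0 (c - 1)) (b := min num_c (c + 2)) (by omega)]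
      simp

-- ===== VERDICT (by name: the statement is the Claim_ definition above) =====
theorem generate_around_spec : Claim_equal_generate_around := by
  intro pos size _
  unfold Spec_generate_around
  exact generate_around_eq pos size
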